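-- pv_equiv track=rewrite | github.com/YujinNoh/programmers_codingtest | level2/hotter.py | solution
-- ===== SOURCE A (Python) =====
-- import heapq
--
-- def solution(scoville, K):
--     answer = 0
--     heapq.heapify(scoville)
--
--     while (len(scoville) >= 2) and (scoville[0] < K):
--         hot1 = heapq.heappop(scoville)
--         hot2 = heapq.heappop(scoville)
--         heapq.heappush(scoville, hot1 + 2 * hot2)
--         answer += 1
--
--     if scoville[0] < K:
--         answer = -1
--
--     return answer
-- ===== SOURCE B (Python) =====
-- def solution(scoville, K):
--     s = sorted(scoville)
--     answer = 0
--     while len(s) >= 2 and s[0] < K: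
--         mix = s[0] + 2 * s[1]
--         s = s[2:]
--         i = 0
--         while i < len(s) and s[i] < mix:
--             i += 1
--         s.insert(i, mix)
--         answer += 1
--     if s[0] < K:
--         answer = -1
--     return answer
-- ===== Notes on version B (the rewrite author's own statement) =====
-- stated objective: simpler
-- what changed: Replaces the binary heap (heapify + heappop/heappush) with a list sorted once up front, from which the two smallest elements are popped at the front and the mix is re-inserted in order by a linear scan.
import Mathlib
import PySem

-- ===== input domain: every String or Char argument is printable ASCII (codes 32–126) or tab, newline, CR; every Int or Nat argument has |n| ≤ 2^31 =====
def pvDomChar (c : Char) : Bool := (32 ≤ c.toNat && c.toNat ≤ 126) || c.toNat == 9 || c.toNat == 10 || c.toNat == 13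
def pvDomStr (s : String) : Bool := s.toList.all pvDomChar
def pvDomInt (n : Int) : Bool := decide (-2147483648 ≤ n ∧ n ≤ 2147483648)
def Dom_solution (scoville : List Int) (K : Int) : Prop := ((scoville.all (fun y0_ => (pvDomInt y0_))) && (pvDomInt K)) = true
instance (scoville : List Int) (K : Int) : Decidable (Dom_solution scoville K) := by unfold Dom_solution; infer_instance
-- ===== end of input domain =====

-- B replaces A's binary heap (heapify/heappop/heappush) by a once-sorted list: pop the two
-- smallest off the front, insert the mix back in order by a linear scan (objective: simpler).
-- Python A mutates its argument in place (heapify order), B does not; the equivalence proved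
-- here is about the return value only.


-- ===== PORT A =====
-- CPython heapq._siftdown(heap, startpos, pos): bubble newitem up, then write it back.
-- `fuel` only makes the loop structurally recursive; pos strictly decreases, so `fuel = pos`
-- at the call site is enough and the 0-branch coincides with the loop exit.
def sdLoop : Nat → List Int → Int → Nat → Nat → List Int
  | 0, b, newitem, _, q => b.set q newitem
  | fuel + 1, b, newitem, s, q =>
    if s < q then
      if newitem < b[(q - 1) / 2]! then
        sdLoop fuel (b.set q b[(q - 1) / 2]!) newitem s ((q - 1) / 2)
      else b.set q newitem
    else b.set q newitem

def pySiftdown (b : List Int) (s q : Nat) : List Int := sdLoop q b b[q]! s q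

-- the `childpos = rightpos` choice of CPython heapq._siftup's loop body
def suChild (b : List Int) (endpos q : Nat) : Nat :=
  if 2 * q + 2 < endpos && !(b[2 * q + 1]! < b[2 * q + 2]!) then 2 * q + 2 else 2 * q + 1

-- CPython heapq._siftup's child-promotion loop: returns (array, final pos).
-- pos strictly increases below endpos, so `fuel = endpos` suffices; 0-branch = loop exit.
def suLoop : Nat → List Int → Nat → Nat → List Int × Nat
  | 0, b, _, q => (b, q)
  | fuel + 1, b, endpos, q =>
    if 2 * q + 1 < endpos then
      suLoop fuel (b.set q b[suChild b endpos q]!) endpos (suChild b endpos q)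
    else (b, q)

-- CPython heapq._siftup(heap, pos)
def pySiftup (b : List Int) (p : Nat) : List Int :=
  pySiftdown ((suLoop b.length b b.length p).1.set (suLoop b.length b b.length p).2 b[p]!)
    p (suLoop b.length b b.length p).2

-- CPython heapq.heapify: for i in reversed(range(n//2)): _siftup(x, i)
def pyHeapify (b : List Int) : List Int :=
  (List.range (b.length / 2)).reverse.foldl (fun a i => pySiftup a i) b

-- CPython heapq.heappop (on a nonempty list, as in A's loop)
def pyHeappop (b : List Int) : Int × List Int :=
  if b.dropLast ≠ [] then (b.dropLast[0]!, pySiftup (b.dropLast.set 0 b.getLast!) 0)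
  else (b.getLast!, b.dropLast)

-- CPython heapq.heappush
def pyHeappush (b : List Int) (item : Int) : List Int :=
  pySiftdown (b ++ [item]) 0 b.length

-- A's while loop; each iteration shrinks the heap by one, so `fuel = length` suffices
-- (the 0-branch coincides with the loop exit).
def solutionLoop : Nat → List Int → Int → Int → List Int × Int
  | 0, heap, _, answer => (heap, answer)
  | fuel + 1, heap, K, answer =>
    if 2 ≤ heap.length ∧ heap[0]! < K then
      solutionLoop fuel (pyHeappush (pyHeappop (pyHeappop heap).2).2
        ((pyHeappop heap).1 + 2 * (pyHeappop (pyHeappop heap).2).1)) K (answer + 1)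
    else (heap, answer)

def solution (scoville : List Int) (K : Int) : Int :=
  let heap := pyHeapify scoville
  let r := solutionLoop heap.length heap K 0
  if r.1[0]! < K then -1 else r.2

-- ===== PORT B =====
-- B's while loop: pop the two smallest off the front of the sorted list, insert the mix
-- back in order (the linear scan + insert of Source B = List.orderedInsert); fuel as above.
def altLoop : Nat → List Int → Int → Int → List Int × Int
  | 0, s, _, answer => (s, answer)
  | fuel + 1, s, K, answer =>
    if 2 ≤ s.length ∧ s[0]! < K then
      altLoop fuel (List.orderedInsert (· ≤ ·) (s[0]! + 2 * s[1]!) (s.drop 2)) K (answer + 1)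
    else (s, answer)

def solution_alt (scoville : List Int) (K : Int) : Int :=
  let s := PySem.List.sorted scoville (fun x => x) false
  let r := altLoop s.length s K 0
  if r.1[0]! < K then -1 else r.2

-- ===== PRECONDITION & SPEC =====
-- Pre_ excludes only the empty list, on which A raises IndexError at the final scoville[0]
-- (B raises the same IndexError there).
def Pre_solution (scoville : List Int) (K : Int) : Prop := scoville ≠ []
instance (scoville : List Int) (K : Int) : Decidable (Pre_solution scoville K) := by
  unfold Pre_solution; infer_instance
def pvWitness_solution : List Int × Int := ([1, 2, 3, 9, 10, 12], 7)
def Spec_solution (scoville : List Int) (K : Int) (out : Int) : Prop := out = solution_alt scoville K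
instance (scoville : List Int) (K : Int) (out : Int) : Decidable (Spec_solution scoville K out) := by
  unfold Spec_solution; infer_instance

-- ===== CLAIM (what is proved, stated in full; the proofs are below) =====
def Claim_equal_solution : Prop := ∀ (scoville : List Int) (K : Int), Dom_solution scoville K → Pre_solution scoville K → Spec_solution scoville K (solution scoville K)

-- ===== LEMMAS AND PROOFS =====

-- `inSub s j` : j lies in the subtree rooted at s of the binary-heap index tree.
def inSub (s j : Nat) : Bool :=
  if j = s then true else if j = 0 then false else inSub s ((j - 1) / 2)
termination_by j
decreasing_by omega

lemma inSub_self (s : Nat) : inSub s s = true := by rw [inSub]; simp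

lemma inSub_parent {s j : Nat} (h : inSub s j = true) (hne : j ≠ s) :
    0 < j ∧ inSub s ((j - 1) / 2) = true := by
  rw [inSub] at h
  simp only [hne, if_false] at h
  by_cases h0 : j = 0
  · simp [h0] at h
  · simp only [h0, if_false] at h
    exact ⟨by omega, h⟩

lemma inSub_le {s j : Nat} (h : inSub s j = true) : s ≤ j := by
  induction j using Nat.strong_induction_on generalizing s with
  | _ j ih =>
    by_cases hj : j = s
    · omega
    · obtain ⟨h0, hp⟩ := inSub_parent h hj
      have := ih ((j - 1) / 2) (by omega) hp
      omega

lemma inSub_child {s j : Nat} (h : inSub s ((j - 1) / 2) = true) (hj : 0 < j) :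
    inSub s j = true := by
  by_cases hje : j = s
  · simp [hje, inSub_self]
  · rw [inSub]; simp [hje, Nat.pos_iff_ne_zero.mp hj, h]

lemma not_inSub_parent {s j : Nat} (h : inSub s j = false) (hj : 0 < j) :
    inSub s ((j - 1) / 2) = false := by
  by_contra hc
  have := inSub_child (s := s) (j := j) (by simpa using hc) hj
  simp [h] at this

lemma inSub_zero (j : Nat) : inSub 0 j = true := by
  induction j using Nat.strong_induction_on with
  | _ j ih =>
    by_cases hj : j = 0
    · simp [hj, inSub_self]
    · exact inSub_child (ih ((j - 1) / 2) (by omega)) (by omega)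

lemma gB {l : List Int} {i : Nat} (h : i < l.length) : l[i]! = l[i] := getElem!_pos l i h

lemma setB {l : List Int} (i : Nat) (v : Int) {j : Nat} (hj : j < l.length) :
    (l.set i v)[j]! = if i = j then v else l[j]! := by
  rw [getElem!_pos _ j (by simpa using hj), List.getElem_set]
  by_cases h : i = j <;> simp [h, gB hj]

lemma msSet {l : List Int} {i : Nat} (h : i < l.length) (v : Int) :
    (↑(l.set i v) : Multiset Int) + {l[i]!} = ↑l + {v} := by
  rw [gB h]
  induction l generalizing i with
  | nil => simp at h
  | cons a t ih =>
    cases i with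
    | zero =>
      simp only [List.set, List.getElem_cons_zero, ← Multiset.cons_coe, ← Multiset.singleton_add]
      abel
    | succ n =>
      have hn : n < t.length := by simpa using h
      have h2 := ih hn
      simp only [List.set, List.getElem_cons_succ, ← Multiset.cons_coe, ← Multiset.singleton_add]
      rw [add_assoc, add_assoc, h2]

lemma sdLoop_spec (fuel : Nat) : ∀ (b : List Int) (newitem : Int) (s q : Nat),
    q ≤ fuel → q < b.length → inSub s q = true →
    (∀ j, j < b.length → 0 < j → inSub s j = true → j ≠ q → j ≠ s → b[(j - 1) / 2]! ≤ b[j]!) →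
    (∀ j, j < b.length → (j - 1) / 2 = q → j ≠ q → newitem ≤ b[j]!) →
    (s < q → ∀ j, j < b.length → (j - 1) / 2 = q → j ≠ q → b[(q - 1) / 2]! ≤ b[j]!) →
    (sdLoop fuel b newitem s q).length = b.length ∧
    (↑(sdLoop fuel b newitem s q) : Multiset Int) = ↑(b.set q newitem) ∧
    (∀ j, j < b.length → inSub s j = false → (sdLoop fuel b newitem s q)[j]! = b[j]!) ∧
    (∀ j, j < b.length → 0 < j → inSub s j = true → j ≠ s →
      (sdLoop fuel b newitem s q)[(j - 1) / 2]! ≤ (sdLoop fuel b newitem s q)[j]!) := by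
  induction fuel with
  | zero =>
    intro b newitem s q hf hq hsub Pb P2 P3
    have hq0 : q = 0 := by omega
    have hqs : q = s := by have := inSub_le hsub; omega
    simp only [sdLoop]
    refine ⟨by simp, by trivial, ?_, ?_⟩
    · intro j hj hns
      have hjq : j ≠ q := by intro e; rw [e, hsub] at hns; simp at hns
      rw [setB _ _ hj, if_neg (Ne.symm hjq)]
    · intro j hj hj0 hjsub hjs
      have hjq : j ≠ q := by omega
      by_cases hpj : (j - 1) / 2 = q
      · rw [setB _ _ (by omega : (j - 1) / 2 < b.length), setB _ _ hj,
          if_pos hpj.symm, if_neg (by omega : ¬ q = j)]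
        exact P2 j hj hpj hjq
      · rw [setB _ _ (by omega : (j - 1) / 2 < b.length), setB _ _ hj,
          if_neg (by omega : ¬ q = (j - 1) / 2), if_neg (by omega : ¬ q = j)]
        exact Pb j hj hj0 hjsub hjq hjs
  | succ fuel ih =>
    intro b newitem s q hf hq hsub Pb P2 P3
    simp only [sdLoop]
    by_cases h : s < q
    swap
    · rw [if_neg h]
      have hqs : q = s := by have := inSub_le hsub; omega
      refine ⟨by simp, by trivial, ?_, ?_⟩
      · intro j hj hns
        have hjq : j ≠ q := by intro e; rw [e, hsub] at hns; simp at hns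
        rw [setB _ _ hj, if_neg (Ne.symm hjq)]
      · intro j hj hj0 hjsub hjs
        have hjq : j ≠ q := by omega
        by_cases hpj : (j - 1) / 2 = q
        · rw [setB _ _ (by omega : (j - 1) / 2 < b.length), setB _ _ hj,
            if_pos hpj.symm, if_neg (by omega : ¬ q = j)]
          exact P2 j hj hpj hjq
        · rw [setB _ _ (by omega : (j - 1) / 2 < b.length), setB _ _ hj,
            if_neg (by omega : ¬ q = (j - 1) / 2), if_neg (by omega : ¬ q = j)]
          exact Pb j hj hj0 hjsub hjq hjs
    rw [if_pos h]
    by_cases hlt : newitem < b[(q - 1) / 2]!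
    swap
    · rw [if_neg hlt]
      have hq0 : 0 < q := by omega
      have hplen : (q - 1) / 2 < b.length := by omega
      refine ⟨by simp, by trivial, ?_, ?_⟩
      · intro j hj hns
        have hjq : j ≠ q := by intro e; rw [e, hsub] at hns; simp at hns
        rw [setB _ _ hj, if_neg (Ne.symm hjq)]
      · intro j hj hj0 hjsub hjs
        by_cases hjq : j = q
        · subst hjq
          rw [setB _ _ hplen, setB _ _ hj, if_neg (by omega : ¬ j = (j - 1) / 2), if_pos rfl]
          exact le_of_not_gt hlt
        · by_cases hpj : (j - 1) / 2 = q
          · rw [setB _ _ (by omega : (j - 1) / 2 < b.length), setB _ _ hj,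
              if_pos hpj.symm, if_neg (by omega : ¬ q = j)]
            exact P2 j hj hpj hjq
          · rw [setB _ _ (by omega : (j - 1) / 2 < b.length), setB _ _ hj,
              if_neg (by omega : ¬ q = (j - 1) / 2), if_neg (by omega : ¬ q = j)]
            exact Pb j hj hj0 hjsub hjq hjs
    rw [if_pos hlt]
    have hq0 : 0 < q := by omega
    have hqs : q ≠ s := by omega
    have hpp : (q - 1) / 2 < q := by omega
    have hplen : (q - 1) / 2 < b.length := by omega
    have hppsub : inSub s ((q - 1) / 2) = true := (inSub_parent hsub hqs).2
    have hppq : (q - 1) / 2 ≠ q := by omega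
    have hsetlen : ∀ v : Int, (b.set q v).length = b.length := by simp
    -- child-of-pp positions are > pp and in the subtree
    have childpp : ∀ j, j < b.length → (j - 1) / 2 = (q - 1) / 2 → j ≠ (q - 1) / 2 →
        0 < j ∧ (q - 1) / 2 < j ∧ inSub s j = true ∧ j ≠ s := by
      intro j hj hpj hjpp
      have h1 : 0 < j := by omega
      have h2 : (q - 1) / 2 < j := by omega
      have h3 : inSub s j = true := inSub_child (by rw [hpj]; exact hppsub) h1
      have h4 : j ≠ s := by have := inSub_le hppsub; omega
      exact ⟨h1, h2, h3, h4⟩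
    -- Pb for the shifted array
    have Pb' : ∀ j, j < (b.set q b[(q - 1) / 2]!).length → 0 < j → inSub s j = true →
        j ≠ (q - 1) / 2 → j ≠ s →
        (b.set q b[(q - 1) / 2]!)[(j - 1) / 2]! ≤ (b.set q b[(q - 1) / 2]!)[j]! := by
      intro j hj hj0 hjsub hjpp hjs
      rw [hsetlen] at hj
      by_cases hjq : j = q
      · subst hjq
        rw [setB _ _ hplen, setB _ _ hq, ite_self, if_pos rfl]
      · by_cases hpj : (j - 1) / 2 = q
        · rw [setB _ _ (by omega : (j - 1) / 2 < b.length), setB _ _ hj,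
            if_pos hpj.symm, if_neg (by omega : ¬ q = j)]
          exact P3 h j hj hpj hjq
        · rw [setB _ _ (by omega : (j - 1) / 2 < b.length), setB _ _ hj,
            if_neg (by omega : ¬ q = (j - 1) / 2), if_neg (by omega : ¬ q = j)]
          exact Pb j hj hj0 hjsub hjq hjs
    have P2' : ∀ j, j < (b.set q b[(q - 1) / 2]!).length → (j - 1) / 2 = (q - 1) / 2 →
        j ≠ (q - 1) / 2 → newitem ≤ (b.set q b[(q - 1) / 2]!)[j]! := by
      intro j hj hpj hjpp
      rw [hsetlen] at hj
      by_cases hjq : j = q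
      · subst hjq; rw [setB _ _ hj, if_pos rfl]; exact le_of_lt hlt
      · obtain ⟨h1, h2, h3, h4⟩ := childpp j hj hpj hjpp
        rw [setB _ _ hj, if_neg (by omega : ¬ q = j)]
        have := Pb j hj h1 h3 hjq h4
        rw [hpj] at this
        exact le_trans (le_of_lt hlt) this
    have P3' : s < (q - 1) / 2 → ∀ j, j < (b.set q b[(q - 1) / 2]!).length →
        (j - 1) / 2 = (q - 1) / 2 → j ≠ (q - 1) / 2 →
        (b.set q b[(q - 1) / 2]!)[((q - 1) / 2 - 1) / 2]! ≤ (b.set q b[(q - 1) / 2]!)[j]! := by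
      intro hspp j hj hpj hjpp
      rw [hsetlen] at hj
      have hglen : ((q - 1) / 2 - 1) / 2 < b.length := by omega
      have hgq : ¬ q = ((q - 1) / 2 - 1) / 2 := by omega
      have hpp0 : 0 < (q - 1) / 2 := by omega
      have hpbpp := Pb ((q - 1) / 2) hplen hpp0 hppsub hppq (by omega)
      by_cases hjq : j = q
      · subst hjq
        rw [setB _ _ hglen, setB _ _ hj, if_neg hgq, if_pos rfl]
        exact hpbpp
      · obtain ⟨h1, h2, h3, h4⟩ := childpp j hj hpj hjpp
        rw [setB _ _ hglen, setB _ _ hj, if_neg hgq, if_neg (by omega : ¬ q = j)]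
        have h5 := Pb j hj h1 h3 hjq h4
        rw [hpj] at h5
        exact le_trans hpbpp h5
    obtain ⟨L, M, OFF, PAIRS⟩ := ih (b.set q b[(q - 1) / 2]!) newitem s ((q - 1) / 2)
      (by omega) (by rw [hsetlen]; exact hplen) hppsub Pb' P2' P3'
    refine ⟨by rw [L, hsetlen], ?_, ?_, ?_⟩
    · -- multiset
      rw [M]
      have e1 := msSet hq (b[(q - 1) / 2]!)
      have e2 := msSet (l := b.set q b[(q - 1) / 2]!) (i := (q - 1) / 2)
        (by rw [hsetlen]; exact hplen) newitem
      have e3 := msSet hq newitem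
      rw [setB _ _ hplen] at e2
      rw [if_neg (by omega : ¬ q = (q - 1) / 2)] at e2
      have key : (↑((b.set q b[(q - 1) / 2]!).set ((q - 1) / 2) newitem) : Multiset Int)
          + ({b[(q - 1) / 2]!} + {b[q]!})
          = (↑(b.set q newitem) : Multiset Int) + ({b[(q - 1) / 2]!} + {b[q]!}) := by
        calc (↑((b.set q b[(q - 1) / 2]!).set ((q - 1) / 2) newitem) : Multiset Int)
            + ({b[(q - 1) / 2]!} + {b[q]!})
            = ((↑((b.set q b[(q - 1) / 2]!).set ((q - 1) / 2) newitem) : Multiset Int)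
              + {b[(q - 1) / 2]!}) + {b[q]!} := by abel
          _ = ((↑(b.set q b[(q - 1) / 2]!) : Multiset Int) + {newitem}) + {b[q]!} := by rw [e2]
          _ = ((↑(b.set q b[(q - 1) / 2]!) : Multiset Int) + {b[q]!}) + {newitem} := by abel
          _ = ((↑b : Multiset Int) + {b[(q - 1) / 2]!}) + {newitem} := by rw [e1]
          _ = ((↑b : Multiset Int) + {newitem}) + {b[(q - 1) / 2]!} := by abel
          _ = ((↑(b.set q newitem) : Multiset Int) + {b[q]!}) + {b[(q - 1) / 2]!} := by rw [e3]
          _ = (↑(b.set q newitem) : Multiset Int) + ({b[(q - 1) / 2]!} + {b[q]!}) := by abel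
      exact add_right_cancel key
    · intro j hj hns
      have hjq : j ≠ q := by intro e; rw [e, hsub] at hns; simp at hns
      rw [OFF j (by rw [hsetlen]; exact hj) hns, setB _ _ hj, if_neg (Ne.symm hjq)]
    · intro j hj hj0 hjsub hjs
      exact PAIRS j (by rw [hsetlen]; exact hj) hj0 hjsub hjs

lemma suChild_facts (b : List Int) (endpos q : Nat) (hend : endpos = b.length)
    (h : 2 * q + 1 < endpos) :
    (suChild b endpos q - 1) / 2 = q ∧ suChild b endpos q < b.length ∧ q < suChild b endpos q ∧
    (∀ j, j < b.length → (j - 1) / 2 = q → j ≠ q → b[suChild b endpos q]! ≤ b[j]!) := by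
  by_cases hc : (2 * q + 2 < endpos && !(b[2 * q + 1]! < b[2 * q + 2]!)) = true
  · have hc' := hc
    simp only [Bool.and_eq_true, decide_eq_true_eq, Bool.not_eq_true',
      decide_eq_false_iff_not] at hc'
    obtain ⟨h1, h2⟩ := hc'
    rw [suChild, if_pos hc]
    refine ⟨by omega, by omega, by omega, ?_⟩
    intro j hj hpj hjq
    have : j = 2 * q + 1 ∨ j = 2 * q + 2 := by omega
    rcases this with rfl | rfl
    · exact le_of_not_gt h2
    · exact le_refl _
  · have h2 : 2 * q + 2 < b.length → b[2 * q + 1]! < b[2 * q + 2]! := by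
      intro hlt
      by_contra hnb
      exact hc (by
        simp only [Bool.and_eq_true, decide_eq_true_eq, Bool.not_eq_true',
          decide_eq_false_iff_not]
        exact ⟨by omega, hnb⟩)
    rw [suChild, if_neg hc]
    refine ⟨by omega, by omega, by omega, ?_⟩
    intro j hj hpj hjq
    have : j = 2 * q + 1 ∨ j = 2 * q + 2 := by omega
    rcases this with rfl | rfl
    · exact le_refl _
    · exact le_of_lt (h2 hj)

lemma suLoop_spec (fuel : Nat) : ∀ (b : List Int) (endpos q : Nat) (p : Nat),
    endpos - q ≤ fuel → endpos = b.length → q < b.length → inSub p q = true →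
    (∀ j, j < b.length → 0 < j → inSub p j = true → j ≠ p → (j - 1) / 2 ≠ q → b[(j - 1) / 2]! ≤ b[j]!) →
    (q ≠ p → ∀ j, j < b.length → (j - 1) / 2 = q → j ≠ q → b[q]! ≤ b[j]!) →
    ((suLoop fuel b endpos q).1.length = b.length ∧
     inSub p (suLoop fuel b endpos q).2 = true ∧
     (suLoop fuel b endpos q).2 < b.length ∧
     b.length ≤ 2 * (suLoop fuel b endpos q).2 + 1 ∧
     (∀ v : Int, (↑((suLoop fuel b endpos q).1.set (suLoop fuel b endpos q).2 v) : Multiset Int) + {b[q]!} = ↑b + {v}) ∧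
     (∀ j, j < b.length → inSub p j = false → (suLoop fuel b endpos q).1[j]! = b[j]!) ∧
     (∀ j, j < b.length → 0 < j → inSub p j = true → j ≠ (suLoop fuel b endpos q).2 → j ≠ p →
       (suLoop fuel b endpos q).1[(j - 1) / 2]! ≤ (suLoop fuel b endpos q).1[j]!)) := by
  induction fuel with
  | zero =>
    intro b endpos q p hfu hend hq hsub A2 A3
    exact absurd hq (by omega)
  | succ fuel ih =>
    intro b endpos q p hfu hend hq hsub A2 A3
    simp only [suLoop]
    by_cases h : 2 * q + 1 < endpos
    swap
    · rw [if_neg h]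
      refine ⟨rfl, hsub, hq, by omega, fun v => msSet hq v, fun j hj hns => rfl, ?_⟩
      intro j hj hj0 hjsub hjq hjp
      by_cases hpjq : (j - 1) / 2 = q
      · omega
      · exact A2 j hj hj0 hjsub hjp hpjq
    rw [if_pos h]
    obtain ⟨hpar, hlt, hgt, hmin⟩ := suChild_facts b endpos q hend h
    have hple : p ≤ q := inSub_le hsub
    have hsetlen : ∀ v : Int, (b.set q v).length = b.length := by simp
    have hccq : ¬ q = suChild b endpos q := by omega
    have hsub' : inSub p (suChild b endpos q) = true :=
      inSub_child (by rw [hpar]; exact hsub) (by omega)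
    have A2' : ∀ j, j < (b.set q b[suChild b endpos q]!).length → 0 < j → inSub p j = true →
        j ≠ p → (j - 1) / 2 ≠ suChild b endpos q →
        (b.set q b[suChild b endpos q]!)[(j - 1) / 2]! ≤ (b.set q b[suChild b endpos q]!)[j]! := by
      intro j hj hj0 hjsub hjp hjpcc
      rw [hsetlen] at hj
      by_cases hjq : j = q
      · subst hjq
        rw [setB _ _ (by omega : (j - 1) / 2 < b.length), setB _ _ hj,
          if_neg (by omega : ¬ j = (j - 1) / 2), if_pos rfl]
        have e1 := A2 j hj hj0 hjsub hjp (by omega)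
        have e2 := A3 (by omega) (suChild b endpos j) hlt hpar (by omega)
        exact le_trans e1 e2
      · by_cases hpjq : (j - 1) / 2 = q
        · rw [setB _ _ (by omega : (j - 1) / 2 < b.length), setB _ _ hj,
            if_pos hpjq.symm, if_neg (by omega : ¬ q = j)]
          exact hmin j hj hpjq hjq
        · rw [setB _ _ (by omega : (j - 1) / 2 < b.length), setB _ _ hj,
            if_neg (by omega : ¬ q = (j - 1) / 2), if_neg (by omega : ¬ q = j)]
          exact A2 j hj hj0 hjsub hjp hpjq
    have A3' : suChild b endpos q ≠ p → ∀ j, j < (b.set q b[suChild b endpos q]!).length →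
        (j - 1) / 2 = suChild b endpos q → j ≠ suChild b endpos q →
        (b.set q b[suChild b endpos q]!)[suChild b endpos q]! ≤ (b.set q b[suChild b endpos q]!)[j]! := by
      intro _ j hj hpj hjcc
      rw [hsetlen] at hj
      rw [setB _ _ hlt, setB _ _ hj, if_neg hccq, if_neg (by omega : ¬ q = j), ← hpj]
      exact A2 j hj (by omega) (inSub_child (by rw [hpj]; exact hsub') (by omega)) (by omega) (by omega)
    obtain ⟨L, SUB, RLT, LEAF, MS, OFF, PAIRS⟩ :=
      ih (b.set q b[suChild b endpos q]!) endpos (suChild b endpos q) p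
        (by omega) (by rw [hsetlen, hend]) (by rw [hsetlen]; exact hlt) hsub' A2' A3'
    rw [hsetlen] at L RLT LEAF
    refine ⟨L, SUB, RLT, LEAF, ?_, ?_, ?_⟩
    · intro v
      have e2 := MS v
      rw [setB _ _ hlt, if_neg hccq] at e2
      have e1 := msSet hq (b[suChild b endpos q]!)
      have key : (↑((suLoop fuel (b.set q b[suChild b endpos q]!) endpos (suChild b endpos q)).1.set
            (suLoop fuel (b.set q b[suChild b endpos q]!) endpos (suChild b endpos q)).2 v) : Multiset Int)
            + {b[q]!} + {b[suChild b endpos q]!}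
          = (↑b : Multiset Int) + {v} + {b[suChild b endpos q]!} := by
        calc (↑((suLoop fuel (b.set q b[suChild b endpos q]!) endpos (suChild b endpos q)).1.set
            (suLoop fuel (b.set q b[suChild b endpos q]!) endpos (suChild b endpos q)).2 v) : Multiset Int)
            + {b[q]!} + {b[suChild b endpos q]!}
            = (↑((suLoop fuel (b.set q b[suChild b endpos q]!) endpos (suChild b endpos q)).1.set
              (suLoop fuel (b.set q b[suChild b endpos q]!) endpos (suChild b endpos q)).2 v) : Multiset Int)
              + {b[suChild b endpos q]!} + {b[q]!} := by abel
          _ = (↑(b.set q b[suChild b endpos q]!) : Multiset Int) + {v} + {b[q]!} := by rw [e2]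
          _ = (↑(b.set q b[suChild b endpos q]!) : Multiset Int) + {b[q]!} + {v} := by abel
          _ = (↑b : Multiset Int) + {b[suChild b endpos q]!} + {v} := by rw [e1]
          _ = (↑b : Multiset Int) + {v} + {b[suChild b endpos q]!} := by abel
      exact add_right_cancel key
    · intro j hj hns
      have hjq : j ≠ q := by intro e; rw [e, hsub] at hns; simp at hns
      rw [OFF j (by rw [hsetlen]; exact hj) hns, setB _ _ hj, if_neg (Ne.symm hjq)]
    · intro j hj hj0 hjsub hjr hjp
      exact PAIRS j (by rw [hsetlen]; exact hj) hj0 hjsub hjr hjp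

lemma pySiftup_spec (b : List Int) (p : Nat) (hp : p < b.length)
    (H : ∀ j, j < b.length → 0 < j → inSub p j = true → j ≠ p → (j - 1) / 2 ≠ p →
      b[(j - 1) / 2]! ≤ b[j]!) :
    (pySiftup b p).length = b.length ∧
    (↑(pySiftup b p) : Multiset Int) = ↑b ∧
    (∀ j, j < b.length → inSub p j = false → (pySiftup b p)[j]! = b[j]!) ∧
    (∀ j, j < b.length → 0 < j → inSub p j = true → j ≠ p →
      (pySiftup b p)[(j - 1) / 2]! ≤ (pySiftup b p)[j]!) := by
  obtain ⟨L, SUB, RLT, LEAF, MS, OFF, PAIRS⟩ :=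
    suLoop_spec b.length b b.length p p (by omega) rfl hp (inSub_self p) H
      (fun hne => absurd rfl hne)
  rcases hsu : suLoop b.length b b.length p with ⟨d, r⟩
  rw [hsu] at L SUB RLT LEAF MS OFF PAIRS
  simp only at L SUB RLT LEAF MS OFF PAIRS
  have hrd : r < d.length := by rw [L]; exact RLT
  have hpd : pySiftup b p = sdLoop r (d.set r b[p]!) ((d.set r b[p]!)[r]!) p r := by
    simp [pySiftup, pySiftdown, hsu]
  have hget : (d.set r b[p]!)[r]! = b[p]! := by rw [setB _ _ hrd, if_pos rfl]
  have hlen : (d.set r b[p]!).length = b.length := by simp [L]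
  have Pb' : ∀ j, j < (d.set r b[p]!).length → 0 < j → inSub p j = true → j ≠ r → j ≠ p →
      (d.set r b[p]!)[(j - 1) / 2]! ≤ (d.set r b[p]!)[j]! := by
    intro j hj hj0 hjsub hjr hjp
    rw [hlen] at hj
    rw [setB _ _ (by omega : (j - 1) / 2 < d.length), setB _ _ (by omega : j < d.length),
      if_neg (by omega : ¬ r = (j - 1) / 2), if_neg (by omega : ¬ r = j)]
    exact PAIRS j hj hj0 hjsub hjr hjp
  have P2' : ∀ j, j < (d.set r b[p]!).length → (j - 1) / 2 = r → j ≠ r → b[p]! ≤ (d.set r b[p]!)[j]! := by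
    intro j hj hpj hjr
    rw [hlen] at hj
    omega
  have P3' : p < r → ∀ j, j < (d.set r b[p]!).length → (j - 1) / 2 = r → j ≠ r →
      (d.set r b[p]!)[(r - 1) / 2]! ≤ (d.set r b[p]!)[j]! := by
    intro _ j hj hpj hjr
    rw [hlen] at hj
    omega
  obtain ⟨L2, M2, OFF2, PAIRS2⟩ := sdLoop_spec r (d.set r b[p]!) (b[p]!) p r
    le_rfl (by rw [hlen]; exact RLT) SUB Pb' P2' P3'
  rw [hget] at hpd
  refine ⟨?_, ?_, ?_, ?_⟩
  · rw [hpd, L2, hlen]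
  · rw [hpd, M2, List.set_set]
    have := MS (b[p]!)
    exact add_right_cancel this
  · intro j hj hns
    have hjr : j ≠ r := by intro e; rw [e, SUB] at hns; simp at hns
    rw [hpd, OFF2 j (by rw [hlen]; exact hj) hns, setB _ _ (by omega : j < d.length),
      if_neg (fun e => hjr e.symm)]
    exact OFF j hj hns
  · intro j hj hj0 hjsub hjp
    rw [hpd]
    exact PAIRS2 j (by rw [hlen]; exact hj) hj0 hjsub hjp

def IsHeap (l : List Int) : Prop :=
  ∀ j, j < l.length → 0 < j → l[(j - 1) / 2]! ≤ l[j]!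

-- heap property for all parent/child pairs whose parent index is ≥ i
def HP (l : List Int) (i : Nat) : Prop :=
  ∀ j, j < l.length → 0 < j → i ≤ (j - 1) / 2 → l[(j - 1) / 2]! ≤ l[j]!

lemma heapifyAux_spec (i : Nat) (b : List Int) (hi : i ≤ b.length / 2) (hb : HP b i) :
    ((List.range i).reverse.foldl (fun a j => pySiftup a j) b).length = b.length ∧
    (↑((List.range i).reverse.foldl (fun a j => pySiftup a j) b) : Multiset Int) = ↑b ∧
    HP ((List.range i).reverse.foldl (fun a j => pySiftup a j) b) 0 := by
  induction i generalizing b with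
  | zero => exact ⟨rfl, rfl, hb⟩
  | succ i ih =>
    rw [List.range_succ, List.reverse_append, List.reverse_cons, List.reverse_nil,
      List.nil_append, List.singleton_append, List.foldl_cons]
    have hilen : i < b.length := by omega
    have H : ∀ j, j < b.length → 0 < j → inSub i j = true → j ≠ i → (j - 1) / 2 ≠ i →
        b[(j - 1) / 2]! ≤ b[j]! := by
      intro j hj hj0 hjsub hji hpji
      have hile : i ≤ (j - 1) / 2 := by
        have h1 := (inSub_parent hjsub hji).2
        exact inSub_le h1
      exact hb j hj hj0 (by omega)
    obtain ⟨L, M, OFF, PAIRS⟩ := pySiftup_spec b i hilen H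
    have hp' : HP (pySiftup b i) i := by
      intro j hj hj0 hile
      rw [L] at hj
      by_cases hjsub : inSub i j = true
      · exact PAIRS j hj hj0 hjsub (by omega)
      · have hnj : inSub i j = false := by simpa using hjsub
        have hnp : inSub i ((j - 1) / 2) = false := not_inSub_parent hnj hj0
        have hpi : (j - 1) / 2 ≠ i := by
          intro e; rw [e, inSub_self] at hnp; simp at hnp
        rw [OFF j hj hnj, OFF ((j - 1) / 2) (by omega) hnp]
        exact hb j hj hj0 (by omega)
    obtain ⟨L2, M2, HP2⟩ := ih (pySiftup b i) (by rw [L]; omega) hp'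
    exact ⟨by rw [L2, L], by rw [M2, M], HP2⟩

lemma pyHeapify_spec (b : List Int) :
    (pyHeapify b).length = b.length ∧ (↑(pyHeapify b) : Multiset Int) = ↑b ∧ IsHeap (pyHeapify b) := by
  have h0 : HP b (b.length / 2) := by
    intro j hj hj0 hile
    omega
  obtain ⟨L, M, HPf⟩ := heapifyAux_spec (b.length / 2) b le_rfl h0
  refine ⟨L, M, ?_⟩
  intro j hj hj0
  exact HPf j hj hj0 (Nat.zero_le _)

lemma heapRoot_min (l : List Int) (h : IsHeap l) :
    ∀ j, j < l.length → l[0]! ≤ l[j]! := by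
  intro j
  induction j using Nat.strong_induction_on with
  | _ j ih =>
    intro hj
    by_cases hj0 : j = 0
    · subst hj0; exact le_refl _
    · have h1 := ih ((j - 1) / 2) (by omega) (by omega)
      exact le_trans h1 (h j hj (by omega))

lemma getLastB {l : List Int} (hne : l ≠ []) : l.getLast! = l.getLast hne := by
  rw [List.getLast!_eq_getLast?_getD, List.getLast?_eq_some_getLast hne]
  rfl

lemma pyHeappop_spec (l : List Int) (hne : l ≠ []) (h : IsHeap l) :
    (pyHeappop l).1 = l[0]! ∧
    (pyHeappop l).2.length = l.length - 1 ∧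
    (↑(pyHeappop l).2 : Multiset Int) + {l[0]!} = ↑l ∧
    IsHeap (pyHeappop l).2 := by
  have hlast : l.dropLast ++ [l.getLast!] = l := by
    rw [getLastB hne]
    exact List.dropLast_append_getLast hne
  by_cases hd : l.dropLast = []
  · have hl1 : l = [l.getLast!] := by
      conv_lhs => rw [← hlast, hd]
      simp
    have h0 : l[0]! = l.getLast! := by
      conv_lhs => rw [hl1]
      rw [gB (l := [l.getLast!]) (by simp)]
      simp
    rw [pyHeappop, if_neg (by simpa using hd)]
    refine ⟨h0.symm, by simp, ?_, ?_⟩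
    · rw [hd, h0]
      conv_rhs => rw [hl1]
      simp [← Multiset.cons_coe, ← Multiset.singleton_add]
    · intro j hj hj0; rw [hd] at hj; simp at hj
  · have hd1 : 0 < l.dropLast.length := List.length_pos_of_ne_nil hd
    have hdl : l.dropLast.length = l.length - 1 := by simp
    have hlen1 : 1 < l.length := by omega
    have hgd : ∀ j, j < l.dropLast.length → l.dropLast[j]! = l[j]! := by
      intro j hj
      rw [gB hj, gB (by omega : j < l.length), List.getElem_dropLast]
    have hset : ∀ j, j < l.dropLast.length → j ≠ 0 →
        (l.dropLast.set 0 l.getLast!)[j]! = l[j]! := by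
      intro j hj hj0
      rw [setB _ _ hj, if_neg (fun e => hj0 e.symm), hgd j hj]
    have hsetlen : (l.dropLast.set 0 l.getLast!).length = l.length - 1 := by simp
    have H : ∀ j, j < (l.dropLast.set 0 l.getLast!).length → 0 < j → inSub 0 j = true →
        j ≠ 0 → (j - 1) / 2 ≠ 0 →
        (l.dropLast.set 0 l.getLast!)[(j - 1) / 2]! ≤ (l.dropLast.set 0 l.getLast!)[j]! := by
      intro j hj hj0 _ _ hpj0
      rw [hsetlen] at hj
      rw [hset j (by omega) (by omega), hset ((j - 1) / 2) (by omega) hpj0]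
      exact h j (by omega) hj0
    obtain ⟨L, M, OFF, PAIRS⟩ := pySiftup_spec (l.dropLast.set 0 l.getLast!) 0
      (by rw [hsetlen]; omega) H
    rw [pyHeappop, if_pos (by simpa using hd)]
    refine ⟨?_, ?_, ?_, ?_⟩
    · exact hgd 0 hd1
    · rw [L, hsetlen]
    · rw [M]
      have e1 := msSet (l := l.dropLast) (i := 0) hd1 (l.getLast!)
      rw [hgd 0 hd1] at e1
      have e2 : (↑(l.dropLast) : Multiset Int) + {l.getLast!} = ↑l := by
        conv_rhs => rw [← hlast]
        rw [← Multiset.coe_add, ← Multiset.coe_singleton]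
      rw [e1, e2]
    · intro j hj hj0
      rw [L, hsetlen] at hj
      exact PAIRS j (by rw [hsetlen]; omega) hj0 (inSub_zero j) (by omega)

lemma pyHeappush_spec (l : List Int) (x : Int) (h : IsHeap l) :
    (pyHeappush l x).length = l.length + 1 ∧
    (↑(pyHeappush l x) : Multiset Int) = ↑l + {x} ∧
    IsHeap (pyHeappush l x) := by
  have hblen : (l ++ [x]).length = l.length + 1 := by simp
  have hgetn : (l ++ [x])[l.length]! = x := by
    rw [gB (by simp : l.length < (l ++ [x]).length)]
    simp
  have hgetl : ∀ j, j < l.length → (l ++ [x])[j]! = l[j]! := by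
    intro j hj
    rw [gB (by simp; omega : j < (l ++ [x]).length), gB hj, List.getElem_append_left hj]
  have Pb : ∀ j, j < (l ++ [x]).length → 0 < j → inSub 0 j = true → j ≠ l.length → j ≠ 0 →
      (l ++ [x])[(j - 1) / 2]! ≤ (l ++ [x])[j]! := by
    intro j hj hj0 _ hjn _
    rw [hblen] at hj
    rw [hgetl j (by omega), hgetl ((j - 1) / 2) (by omega)]
    exact h j (by omega) hj0
  have P2 : ∀ j, j < (l ++ [x]).length → (j - 1) / 2 = l.length → j ≠ l.length →
      (l ++ [x])[l.length]! ≤ (l ++ [x])[j]! := by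
    intro j hj hpj hjn
    rw [hblen] at hj
    omega
  have P3 : 0 < l.length → ∀ j, j < (l ++ [x]).length → (j - 1) / 2 = l.length →
      j ≠ l.length → (l ++ [x])[(l.length - 1) / 2]! ≤ (l ++ [x])[j]! := by
    intro _ j hj hpj hjn
    rw [hblen] at hj
    omega
  obtain ⟨L, M, OFF, PAIRS⟩ := sdLoop_spec l.length (l ++ [x]) ((l ++ [x])[l.length]!) 0 l.length
    le_rfl (by simp) (inSub_zero _) Pb P2 P3
  have hpush : pyHeappush l x = sdLoop l.length (l ++ [x]) ((l ++ [x])[l.length]!) 0 l.length := rfl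
  have e2 : (↑(l ++ [x]) : Multiset Int) = ↑l + {x} := by
    rw [← Multiset.coe_singleton, Multiset.coe_add]
  refine ⟨?_, ?_, ?_⟩
  · rw [hpush, L, hblen]
  · rw [hpush, M, hgetn]
    have e1 := msSet (l := l ++ [x]) (i := l.length) (by simp) ((l ++ [x])[l.length]!)
    rw [hgetn] at e1
    rw [e2] at e1
    exact add_right_cancel e1
  · intro j hj hj0
    rw [hpush, L, hblen] at hj
    rw [hpush]
    exact PAIRS j (by rw [hblen]; omega) hj0 (inSub_zero j) (by omega)

lemma heads_eq (heap s : List Int) (hm : (↑heap : Multiset Int) = ↑s) (hh : IsHeap heap)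
    (hs : s.Pairwise (· ≤ ·)) (hne : heap ≠ []) : heap[0]! = s[0]! := by
  have hlen : heap.length = s.length := by
    have := congrArg Multiset.card hm
    simpa using this
  have hhlen : 0 < heap.length := List.length_pos_of_ne_nil hne
  rcases s with _ | ⟨a, t⟩
  · rw [List.length_nil] at hlen; omega
  · have hmem : ∀ x : Int, x ∈ heap ↔ x ∈ a :: t := by
      intro x
      rw [← Multiset.mem_coe, hm, Multiset.mem_coe]
    have hs0 : (a :: t)[0]! = a := by rw [gB (by simp)]; rfl
    rw [hs0]
    have h1 : a ≤ heap[0]! := by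
      have hin : heap[0]! ∈ a :: t := by
        rw [← hmem, gB hhlen]
        exact List.getElem_mem hhlen
      rcases List.mem_cons.mp hin with e | hmt
      · omega
      · exact (List.pairwise_cons.mp hs).1 _ hmt
    have h2 : heap[0]! ≤ a := by
      have hin : a ∈ heap := (hmem a).mpr (by simp)
      obtain ⟨i, hi, he⟩ := List.mem_iff_getElem.mp hin
      have := heapRoot_min heap hh i hi
      rw [gB hi, he] at this
      exact this
    omega

lemma ms_tail_cancel {h : List Int} {x : Int} {t : List Int}
    (hm : (↑h : Multiset Int) + {x} = ↑(x :: t)) : (↑h : Multiset Int) = ↑t := by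
  rw [← Multiset.cons_coe, ← Multiset.singleton_add, add_comm ({x} : Multiset Int) (↑t)] at hm
  exact add_right_cancel hm

lemma loop_eq (fuel : Nat) : ∀ (heap s : List Int) (K ans : Int),
    heap.length ≤ fuel → 1 ≤ heap.length → (↑heap : Multiset Int) = ↑s → IsHeap heap →
    s.Pairwise (· ≤ ·) →
    (solutionLoop fuel heap K ans).2 = (altLoop fuel s K ans).2 ∧
    (solutionLoop fuel heap K ans).1 ≠ [] ∧ (altLoop fuel s K ans).1 ≠ [] ∧
    (solutionLoop fuel heap K ans).1[0]! = (altLoop fuel s K ans).1[0]! := by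
  induction fuel with
  | zero =>
    intro heap s K ans hf hn hm hh hs
    exact absurd hn (by omega)
  | succ fuel ih =>
    intro heap s K ans hf hn hm hh hs
    have hslen : s.length = heap.length := by
      have := congrArg Multiset.card hm
      simp at this
      omega
    have hhne : heap ≠ [] := by
      intro e; rw [e] at hn; simp at hn
    have hsne : s ≠ [] := by
      intro e; rw [e] at hslen; simp at hslen; omega
    have hhead := heads_eq heap s hm hh hs hhne
    by_cases hg : 2 ≤ heap.length ∧ heap[0]! < K
    · have hg' : 2 ≤ s.length ∧ s[0]! < K := ⟨by omega, by rw [← hhead]; exact hg.2⟩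
      rcases s with _ | ⟨a, t0⟩
      · simp at hslen; omega
      rcases t0 with _ | ⟨b, t⟩
      · rcases hg' with ⟨hc, _⟩; simp at hc
      have hsa : (a :: b :: t)[0]! = a := by rw [gB (by simp)]; rfl
      have hsb : (a :: b :: t)[1]! = b := by rw [gB (by simp)]; rfl
      have ha : heap[0]! = a := by rw [hhead, hsa]
      obtain ⟨V1, L1, M1, IH1⟩ := pyHeappop_spec heap hhne hh
      have h1ne : (pyHeappop heap).2 ≠ [] := by
        have : 0 < (pyHeappop heap).2.length := by omega
        exact List.ne_nil_of_length_pos this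
      have hm1 : (↑(pyHeappop heap).2 : Multiset Int) = ↑(b :: t) := by
        have e : (↑(pyHeappop heap).2 : Multiset Int) + {heap[0]!} = ↑(b :: t) + {heap[0]!} := by
          rw [M1, hm, ha, ← Multiset.cons_coe, ← Multiset.singleton_add, add_comm]
        exact add_right_cancel e
      obtain ⟨V2, L2, M2, IH2⟩ := pyHeappop_spec (pyHeappop heap).2 h1ne IH1
      have hpb : (b :: t).Pairwise (· ≤ ·) := (List.pairwise_cons.mp hs).2
      have hsb0 : (b :: t)[0]! = b := by rw [gB (by simp)]; rfl
      have hb : (pyHeappop heap).2[0]! = b := by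
        rw [heads_eq _ _ hm1 IH1 hpb h1ne, hsb0]
      have h2m : (↑(pyHeappop (pyHeappop heap).2).2 : Multiset Int) = ↑t := by
        have e := M2
        rw [hb, hm1] at e
        exact ms_tail_cancel e
      obtain ⟨L3, M3, IH3⟩ := pyHeappush_spec (pyHeappop (pyHeappop heap).2).2
        ((pyHeappop heap).1 + 2 * (pyHeappop (pyHeappop heap).2).1) IH2
      have hv : (pyHeappop heap).1 + 2 * (pyHeappop (pyHeappop heap).2).1 = a + 2 * b := by
        rw [V1, V2, ha, hb]
      have hoi : (↑(List.orderedInsert (· ≤ ·) (a + 2 * b) t) : Multiset Int)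
          = ↑t + {a + 2 * b} := by
        rw [Multiset.coe_eq_coe.mpr (List.perm_orderedInsert (· ≤ ·) (a + 2 * b) t),
          ← Multiset.cons_coe, ← Multiset.singleton_add, add_comm]
      have hm3 : (↑(pyHeappush (pyHeappop (pyHeappop heap).2).2
            ((pyHeappop heap).1 + 2 * (pyHeappop (pyHeappop heap).2).1)) : Multiset Int)
          = ↑(List.orderedInsert (· ≤ ·) (a + 2 * b) t) := by
        rw [M3, h2m, hv, hoi]
      have hp3 : (List.orderedInsert (· ≤ ·) (a + 2 * b) t).Pairwise (· ≤ ·) :=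
        List.Pairwise.orderedInsert (a + 2 * b) t (List.Pairwise.of_cons hpb)
      have hl3 : (pyHeappush (pyHeappop (pyHeappop heap).2).2
          ((pyHeappop heap).1 + 2 * (pyHeappop (pyHeappop heap).2).1)).length
          = heap.length - 1 := by
        omega
      simp only [solutionLoop, altLoop]
      rw [if_pos hg, if_pos hg', hsa, hsb, (rfl : (a :: b :: t).drop 2 = t)]
      exact ih _ _ K (ans + 1) (by omega) (by omega) hm3 IH3 hp3
    · have hg' : ¬ (2 ≤ s.length ∧ s[0]! < K) := by
        intro ⟨c1, c2⟩
        exact hg ⟨by omega, by rw [hhead]; exact c2⟩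
      simp only [solutionLoop, altLoop]
      rw [if_neg hg, if_neg hg']
      exact ⟨rfl, hhne, hsne, hhead⟩

-- ===== VERDICT =====
theorem solution_spec : Claim_equal_solution := by
  unfold Claim_equal_solution
  intro scoville K hdom hpre
  unfold Spec_solution
  show solution scoville K = solution_alt scoville K
  obtain ⟨L, M, HH⟩ := pyHeapify_spec scoville
  have hperm : (PySem.List.sorted scoville (fun x => x) false).Perm scoville :=
    PySem.List.sorted_perm scoville (fun x => x) false
  have hm : (↑(pyHeapify scoville) : Multiset Int)
      = ↑(PySem.List.sorted scoville (fun x => x) false) := by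
    rw [M, Multiset.coe_eq_coe]
    exact hperm.symm
  have hp : (PySem.List.sorted scoville (fun x => x) false).Pairwise (· ≤ ·) := by
    have := PySem.List.sorted_pairwise (xs := scoville) (key := fun x => x)
    simpa using this
  have hlen1 : 1 ≤ (pyHeapify scoville).length := by
    rw [L]
    have : scoville.length ≠ 0 := fun e => hpre (List.eq_nil_of_length_eq_zero e)
    omega
  obtain ⟨hans, hne1, hne2, hhead⟩ := loop_eq (pyHeapify scoville).length
    (pyHeapify scoville) (PySem.List.sorted scoville (fun x => x) false) K 0 le_rfl hlen1 hm HH hp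
  have hfeq : (PySem.List.sorted scoville (fun x => x) false).length
      = (pyHeapify scoville).length := by
    rw [hperm.length_eq, L]
  show (if (solutionLoop (pyHeapify scoville).length (pyHeapify scoville) K 0).1[0]! < K
        then (-1 : Int)
      else (solutionLoop (pyHeapify scoville).length (pyHeapify scoville) K 0).2)
    = (if (altLoop (PySem.List.sorted scoville (fun x => x) false).length
          (PySem.List.sorted scoville (fun x => x) false) K 0).1[0]! < K then (-1 : Int)
      else (altLoop (PySem.List.sorted scoville (fun x => x) false).length
          (PySem.List.sorted scoville (fun x => x) false) K 0).2)
  rw [hfeq, hhead, hans]
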